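-- pv_equiv track=rewrite | github.com/ekpasowecabronneta-hue/duckclaw | packages/shared/src/duckclaw/utils/telegram_markdown_v2.py | _clamp_plain_split_for_fences
-- ===== SOURCE A (Python) =====
-- def _markdown_fence_spans(text: str) -> list[tuple[int, int]]:
--     """Intervalos [start, end) que cubren cada bloque ```…``` (end exclusivo del cierre)."""
--     spans: list[tuple[int, int]] = []
--     pos = 0
--     n = len(text)
--     while pos < n:
--         a = text.find("```", pos)
--         if a == -1:
--             break
--         b = text.find("```", a + 3)
--         if b == -1:
--             spans.append((a, n))
--             break
--         spans.append((a, b + 3))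
--         pos = b + 3
--     return spans
--
-- def _clamp_plain_split_for_fences(plain: str, idx: int) -> int:
--     """Evita cortar dentro de un fence; Telegram trunca si el HTML queda mal cerrado en un trozo."""
--     if idx <= 0 or idx >= len(plain):
--         return idx
--     for start, end in _markdown_fence_spans(plain):
--         if start >= end:
--             continue
--         if start < idx < end:
--             left = idx - start
--             right = end - idx
--             snap_left = start
--             snap_right = end
--             if left < right and snap_left > 0:
--                 return snap_left
--             if snap_right < len(plain):
--                 return snap_right
--             if snap_left > 0:
--                 return snap_left
--             return snap_right
--     return idx
-- ===== SOURCE B (Python) =====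
-- def _clamp_plain_split_for_fences(plain: str, idx: int) -> int:
--     """Flat scan of ``` markers + arithmetic pairing, instead of building span pairs and looping over them."""
--     n = len(plain)
--     if idx <= 0 or idx >= n:
--         return idx
--     # one flat pass: every non-overlapping ``` marker position
--     marks = []
--     i = 0
--     while i < n:
--         a = plain.find("```", i)
--         if a == -1:
--             break
--         marks.append(a)
--         i = a + 3
--     # locate the fence containing idx arithmetically: count markers before idx
--     c = sum(1 for m in marks if m < idx)
--     if c == 0:
--         return idx
--     j = c - 1
--     if j % 2 == 0:  # last marker before idx opens a fence
--         start = marks[j]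
--         end = marks[j + 1] + 3 if j + 1 < len(marks) else n
--     else:           # last marker before idx closes a fence
--         start = marks[j - 1]
--         end = marks[j] + 3
--     if idx >= end:
--         return idx
--     if idx - start < end - idx and start > 0:
--         return start
--     if end < n:
--         return end
--     if start > 0:
--         return start
--     return end
-- ===== Notes on version B (the rewrite author's own statement) =====
-- stated objective: alternative
-- what changed: Instead of building a list of (start,end) fence spans and scanning it for the span strictly containing idx, B collects the flat list of non-overlapping ``` marker positions in one pass and locates the containing fence arithmetically: it counts markers before idx and uses the parity of that count to read the fence's start/end off the marker list, then applies the same snap fallback chain.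
import Mathlib
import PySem

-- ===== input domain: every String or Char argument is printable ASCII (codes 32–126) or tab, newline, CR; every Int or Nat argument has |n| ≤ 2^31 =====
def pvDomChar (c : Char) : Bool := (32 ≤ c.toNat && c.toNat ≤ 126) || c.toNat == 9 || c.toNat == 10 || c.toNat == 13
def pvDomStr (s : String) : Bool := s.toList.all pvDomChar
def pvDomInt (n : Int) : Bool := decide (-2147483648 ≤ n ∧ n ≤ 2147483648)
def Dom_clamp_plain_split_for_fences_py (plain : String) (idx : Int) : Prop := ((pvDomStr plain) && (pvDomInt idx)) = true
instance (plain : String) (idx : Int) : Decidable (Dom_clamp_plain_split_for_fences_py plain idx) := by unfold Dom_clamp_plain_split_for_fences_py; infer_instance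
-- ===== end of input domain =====

-- B replaces A's span-pair construction + span loop by a flat ``` marker list located arithmetically (count/parity); same return value.

-- ===== PORT A =====
-- _markdown_fence_spans: while loop ported with fuel (each iteration advances pos by ≥ 3, so length+1 fuel never runs out)
def pvSpansGo (text : String) (n : Int) : Nat → Int → List (Int × Int)
  | 0, _ => []
  | fuel+1, pos =>
    if pos < n then
      let a := PySem.Str.findFrom text "```" pos
      if a = -1 then []
      else
        let b := PySem.Str.findFrom text "```" (a + 3)
        if b = -1 then [(a, n)]
        else (a, b + 3) :: pvSpansGo text n fuel (b + 3)
    else []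

-- the for-loop over spans (continue / early-return chain)
def pvSnapLoop (lenp : Int) (idx : Int) : List (Int × Int) → Int
  | [] => idx
  | (s, e) :: rest =>
    if s ≥ e then pvSnapLoop lenp idx rest
    else if s < idx ∧ idx < e then
      (if idx - s < e - idx ∧ s > 0 then s
       else if e < lenp then e
       else if s > 0 then s
       else e)
    else pvSnapLoop lenp idx rest

def clamp_plain_split_for_fences_py (plain : String) (idx : Int) : Int :=
  let n : Int := PySem.Str.len plain
  if idx ≤ 0 ∨ idx ≥ n then idx
  else pvSnapLoop n idx (pvSpansGo plain n (plain.length + 1) 0)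

-- ===== PORT B =====
-- flat pass collecting every non-overlapping ``` marker position (fuel as above)
def pvMarksGo (text : String) (n : Int) : Nat → Int → List Int
  | 0, _ => []
  | fuel+1, i =>
    if i < n then
      let a := PySem.Str.findFrom text "```" i
      if a = -1 then [] else a :: pvMarksGo text n fuel (a + 3)
    else []

def clamp_plain_split_for_fences_py_alt (plain : String) (idx : Int) : Int :=
  let n : Int := PySem.Str.len plain
  if idx ≤ 0 ∨ idx ≥ n then idx
  else
    let marks := pvMarksGo plain n (plain.length + 1) 0
    let c := (marks.filter (fun m => m < idx)).length
    if c = 0 then idx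
    else
      let j := c - 1
      let se : Int × Int :=
        if j % 2 = 0 then
          (marks.getD j 0, if j + 1 < marks.length then marks.getD (j + 1) 0 + 3 else n)
        else
          (marks.getD (j - 1) 0, marks.getD j 0 + 3)
      if idx ≥ se.2 then idx
      else if idx - se.1 < se.2 - idx ∧ se.1 > 0 then se.1
      else if se.2 < n then se.2
      else if se.1 > 0 then se.1
      else se.2

-- ===== PRECONDITION & SPEC =====
def Spec_clamp_plain_split_for_fences_py (plain : String) (idx : Int) (out : Int) : Prop := out = clamp_plain_split_for_fences_py_alt plain idx
instance (plain : String) (idx : Int) (out : Int) : Decidable (Spec_clamp_plain_split_for_fences_py plain idx out) := by unfold Spec_clamp_plain_split_for_fences_py; infer_instance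

-- ===== CLAIM (what is proved, stated in full; the proofs are below) =====
def Claim_equal_clamp_plain_split_for_fences_py : Prop := ∀ (plain : String) (idx : Int), Dom_clamp_plain_split_for_fences_py plain idx → Spec_clamp_plain_split_for_fences_py plain idx (clamp_plain_split_for_fences_py plain idx)

-- ===== LEMMAS AND PROOFS =====

-- pairing of the flat marker list into A's spans
def pvPairUp (n : Int) : List Int → List (Int × Int)
  | [] => []
  | [a] => [(a, n)]
  | a :: b :: r => (a, b + 3) :: pvPairUp n r

-- invariant of the marker list: nonneg, each marker fits a whole ``` before n, gaps ≥ 3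
def pvGood (n : Int) (ms : List Int) : Prop :=
  List.Pairwise (fun x y => x + 3 ≤ y) ms ∧ ∀ m ∈ ms, 0 ≤ m ∧ m + 3 ≤ n

theorem pv_findFrom_spec (s : String) (p : Int) (h0 : 0 ≤ p) (hn : p ≤ (s.toList.length : Int))
    (h : PySem.Str.findFrom s "```" p ≠ -1) :
    p ≤ PySem.Str.findFrom s "```" p ∧ PySem.Str.findFrom s "```" p + 3 ≤ (s.toList.length : Int) := by
  have hp : p = ((p.toNat : Nat) : Int) := (Int.toNat_of_nonneg h0).symm
  have hk : p.toNat ≤ s.toList.length := by omega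
  rw [PySem.Str.findFrom_eq] at h ⊢
  rw [hp] at h ⊢
  obtain ⟨h1, h2, -⟩ := PySem.Chars.findFrom_natCast_spec s.toList "```".toList p.toNat hk h
  refine ⟨h1, ?_⟩
  have hlen := h2.length_le
  have h3 : ("```".toList).length = 3 := by rfl
  rw [h3, List.length_drop] at hlen
  have h0r : 0 ≤ PySem.Chars.findFrom s.toList "```".toList ((p.toNat : Nat) : Int) := le_trans (by omega) h1
  omega

theorem pv_marksGo_of_ge (text : String) (n : Int) (f : Nat) (pos : Int) (h : n ≤ pos) :
    pvMarksGo text n f pos = [] := by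
  cases f with
  | zero => rfl
  | succ f => simp [pvMarksGo, not_lt.mpr h]

theorem pv_marksGo_fuel (text : String) (n : Int) (hn : n = (text.toList.length : Int)) :
    ∀ (f g : Nat) (pos : Int), 0 ≤ pos → n ≤ pos + f → n ≤ pos + g →
    pvMarksGo text n f pos = pvMarksGo text n g pos := by
  intro f
  induction f with
  | zero =>
    intro g pos h0 hf hg
    rw [pv_marksGo_of_ge _ _ _ _ (by omega), pv_marksGo_of_ge _ _ _ _ (by omega)]
  | succ f ih =>
    intro g pos h0 hf hg
    cases g with
    | zero =>
      rw [pv_marksGo_of_ge _ _ _ _ (by omega), pv_marksGo_of_ge _ _ _ _ (by omega)]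
    | succ g =>
      by_cases hlt : pos < n
      · simp only [pvMarksGo, if_pos hlt]
        by_cases ha : PySem.Str.findFrom text "```" pos = -1
        · rw [if_pos ha, if_pos ha]
        · have hs := pv_findFrom_spec text pos h0 (by omega) ha
          simp only [if_neg ha]
          have := ih g (PySem.Str.findFrom text "```" pos + 3) (by omega) (by omega) (by omega)
          rw [this]
      · simp only [pvMarksGo, if_neg hlt]

theorem pv_spans_eq_pairUp (text : String) (n : Int) (hn : n = (text.toList.length : Int)) :
    ∀ (f : Nat) (pos : Int), 0 ≤ pos →
    pvSpansGo text n f pos = pvPairUp n (pvMarksGo text n (2 * f) pos) := by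
  intro f
  induction f with
  | zero => intro pos h0; rfl
  | succ f ih =>
    intro pos h0
    have h2 : 2 * (f + 1) = (2 * f + 1) + 1 := by ring
    rw [h2]
    by_cases hlt : pos < n
    · by_cases ha : PySem.Str.findFrom text "```" pos = -1
      · simp only [pvSpansGo, pvMarksGo, if_pos hlt, if_pos ha]; rfl
      · have hs := pv_findFrom_spec text pos h0 (by omega) ha
        by_cases hb : PySem.Str.findFrom text "```" (PySem.Str.findFrom text "```" pos + 3) = -1
        · simp only [pvSpansGo, pvMarksGo, if_pos hlt, if_neg ha, if_pos hb, ite_self]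
          rfl
        · have hs2 := pv_findFrom_spec text (PySem.Str.findFrom text "```" pos + 3) (by omega) (by omega) hb
          have hg : PySem.Str.findFrom text "```" pos + 3 < n := by omega
          simp only [pvSpansGo, pvMarksGo, if_pos hlt, if_neg ha, if_neg hb, if_pos hg, pvPairUp]
          rw [ih _ (by omega)]
    · simp only [pvSpansGo, pvMarksGo, if_neg hlt]; rfl

theorem pv_marksGo_good (text : String) (n : Int) (hn : n = (text.toList.length : Int)) :
    ∀ (f : Nat) (pos : Int), 0 ≤ pos →
    pvGood n (pvMarksGo text n f pos) ∧ ∀ m ∈ pvMarksGo text n f pos, pos ≤ m := by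
  intro f
  induction f with
  | zero => intro pos h0; simp only [pvMarksGo]; exact ⟨⟨List.Pairwise.nil, by simp⟩, by simp⟩
  | succ f ih =>
    intro pos h0
    by_cases hlt : pos < n
    · by_cases ha : PySem.Str.findFrom text "```" pos = -1
      · simp only [pvMarksGo, if_pos hlt, if_pos ha]
        exact ⟨⟨List.Pairwise.nil, by simp⟩, by simp⟩
      · have hs := pv_findFrom_spec text pos h0 (by omega) ha
        obtain ⟨⟨hp, hbnd⟩, hlo⟩ := ih (PySem.Str.findFrom text "```" pos + 3) (by omega)
        simp only [pvMarksGo, if_pos hlt, if_neg ha]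
        refine ⟨⟨List.pairwise_cons.mpr ⟨fun m hm => ?_, hp⟩, fun m hm => ?_⟩, fun m hm => ?_⟩
        · have := hlo m hm; omega
        · rcases List.mem_cons.mp hm with h | h
          · subst h; omega
          · exact hbnd m h
        · rcases List.mem_cons.mp hm with h | h
          · subst h; omega
          · have := hlo m h; omega
    · simp only [pvMarksGo, if_neg hlt]
      exact ⟨⟨List.Pairwise.nil, by simp⟩, by simp⟩

theorem pv_snapLoop_none (lenp idx : Int) : ∀ (ms : List Int), (∀ m ∈ ms, ¬ m < idx) →
    pvSnapLoop lenp idx (pvPairUp lenp ms) = idx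
  | [], _ => rfl
  | [a], h => by
    have ha := h a (by simp)
    simp only [pvPairUp, pvSnapLoop]
    by_cases h1 : a ≥ lenp
    · rw [if_pos h1]
    · rw [if_neg h1, if_neg (fun hc => ha hc.1)]
  | a :: b :: r, h => by
    have ha := h a (by simp)
    have hrec := pv_snapLoop_none lenp idx r (fun m hm => h m (by simp [hm]))
    simp only [pvPairUp, pvSnapLoop]
    by_cases h1 : a ≥ b + 3
    · rw [if_pos h1, hrec]
    · rw [if_neg h1, if_neg (fun hc => ha hc.1), hrec]

-- the arithmetic core of B, so lemmas can talk about it for an arbitrary marker list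
def pvCore (n idx : Int) (ms : List Int) : Int :=
  let c := (ms.filter (fun m => m < idx)).length
  if c = 0 then idx
  else
    let j := c - 1
    let se : Int × Int :=
      if j % 2 = 0 then
        (ms.getD j 0, if j + 1 < ms.length then ms.getD (j + 1) 0 + 3 else n)
      else
        (ms.getD (j - 1) 0, ms.getD j 0 + 3)
    if idx ≥ se.2 then idx
    else if idx - se.1 < se.2 - idx ∧ se.1 > 0 then se.1
    else if se.2 < n then se.2
    else if se.1 > 0 then se.1
    else se.2

theorem pv_core_shift (n idx a b : Int) (r : List Int) (ha : a < idx) (hb3 : b + 3 ≤ idx) :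
    pvCore n idx (a :: b :: r) = pvCore n idx r := by
  have hbi : b < idx := by omega
  simp only [pvCore]
  rw [List.filter_cons_of_pos (by simpa using ha), List.filter_cons_of_pos (by simpa using hbi)]
  simp only [List.length_cons]
  by_cases hc : (List.filter (fun m => decide (m < idx)) r).length = 0
  · rw [hc]
    simp
    split_ifs <;> omega
  · obtain ⟨jr, hjr⟩ : ∃ jr, (List.filter (fun m => decide (m < idx)) r).length = jr + 1 :=
      ⟨_, (Nat.succ_pred_eq_of_pos (Nat.pos_of_ne_zero hc)).symm⟩
    rw [hjr]
    rw [if_neg (show ¬(jr + 1 + 1 + 1 = 0) by omega), if_neg (show ¬(jr + 1 = 0) by omega)]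
    simp only [Nat.add_sub_cancel]
    have e : (jr + 1 + 1) % 2 = jr % 2 := by omega
    rw [e]
    by_cases hp : jr % 2 = 0
    · simp only [if_pos hp, List.getD_cons_succ, Nat.add_lt_add_iff_right]
    · simp only [if_neg hp]
      obtain ⟨jq, hjq⟩ : ∃ jq, jr = jq + 1 := ⟨jr - 1, by omega⟩
      rw [hjq]
      simp only [Nat.add_sub_cancel, List.getD_cons_succ]

theorem pv_snap_eq_core (n idx : Int) (h1 : 0 < idx) (h2 : idx < n) :
    ∀ ms : List Int, pvGood n ms → pvSnapLoop n idx (pvPairUp n ms) = pvCore n idx ms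
  | [], _ => by simp [pvPairUp, pvSnapLoop, pvCore]
  | [a], hg => by
    have hbd := hg.2 a (by simp)
    simp only [pvPairUp, pvSnapLoop, pvCore]
    by_cases hai : a < idx
    · rw [List.filter_cons_of_pos (by simpa using hai)]
      simp only [List.filter_nil, List.length_cons, List.length_nil]
      rw [if_neg (show ¬ a ≥ n by omega), if_pos (show a < idx ∧ idx < n from ⟨hai, h2⟩)]
      simp
      split_ifs <;> omega
    · rw [List.filter_cons_of_neg (by simpa using hai)]
      simp
      split_ifs <;> omega
  | a :: b :: r, hg => by
    have hbda := hg.2 a (by simp)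
    have hbdb := hg.2 b (by simp)
    have hab : a + 3 ≤ b := (List.pairwise_cons.mp hg.1).1 b (by simp)
    have hrb : ∀ m ∈ r, b + 3 ≤ m := (List.pairwise_cons.mp (List.pairwise_cons.mp hg.1).2).1
    have hgr : pvGood n r := ⟨(List.pairwise_cons.mp (List.pairwise_cons.mp hg.1).2).2,
      fun m hm => hg.2 m (by simp [hm])⟩
    by_cases hai : a < idx
    · by_cases hib : idx < b + 3
      · -- idx strictly inside the span (a, b+3): both sides snap with s = a, e = b + 3
        simp only [pvPairUp, pvSnapLoop, pvCore]
        rw [if_neg (show ¬ a ≥ b + 3 by omega), if_pos (show a < idx ∧ idx < b + 3 from ⟨hai, hib⟩)]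
        rw [List.filter_cons_of_pos (by simpa using hai)]
        have hfr : List.filter (fun m => decide (m < idx)) r = [] :=
          List.filter_eq_nil_iff.mpr (fun m hm => by simpa using (by have := hrb m hm; omega : ¬ m < idx))
        by_cases hbi : b < idx
        · rw [List.filter_cons_of_pos (by simpa using hbi), hfr]
          simp
          split_ifs <;> omega
        · rw [List.filter_cons_of_neg (by simpa using hbi), hfr]
          simp
          exact fun hcontr => absurd hcontr (by omega)
      · -- idx at or past the span's end: A's loop moves on, B's count skips the two markers
        have hb3 : b + 3 ≤ idx := by omega
        have hrec := pv_snap_eq_core n idx h1 h2 r hgr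
        calc pvSnapLoop n idx (pvPairUp n (a :: b :: r))
            = pvSnapLoop n idx (pvPairUp n r) := by
              simp only [pvPairUp, pvSnapLoop]
              rw [if_neg (show ¬ a ≥ b + 3 by omega), if_neg (fun hc => absurd hc.2 (by omega))]
          _ = pvCore n idx r := hrec
          _ = pvCore n idx (a :: b :: r) := (pv_core_shift n idx a b r hai hb3).symm
    · -- no marker before idx at all: both sides return idx
      have hnone : ∀ m ∈ a :: b :: r, ¬ m < idx := by
        intro m hm
        rcases List.mem_cons.mp hm with h | h
        · omega
        · rcases List.mem_cons.mp h with h' | h'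
          · omega
          · have := hrb m h'; omega
      rw [pv_snapLoop_none n idx _ hnone]
      simp only [pvCore]
      rw [List.filter_eq_nil_iff.mpr (fun m hm => by simpa using hnone m hm)]
      rfl

-- ===== VERDICT (by name: the statement is the Claim_ definition above) =====
theorem clamp_plain_split_for_fences_py_spec : Claim_equal_clamp_plain_split_for_fences_py := by
  intro plain idx _
  unfold Spec_clamp_plain_split_for_fences_py
  unfold clamp_plain_split_for_fences_py clamp_plain_split_for_fences_py_alt
  have hn : PySem.Str.len plain = (plain.toList.length : Int) := by simp
  have hsl : plain.length = plain.toList.length := by simp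
  by_cases hg : idx ≤ 0 ∨ idx ≥ PySem.Str.len plain
  · simp only [if_pos hg]
  · simp only [if_neg hg]
    rw [not_or, not_le, not_le] at hg
    have hmarks : pvMarksGo plain (PySem.Str.len plain) (2 * (plain.length + 1)) 0
        = pvMarksGo plain (PySem.Str.len plain) (plain.length + 1) 0 :=
      pv_marksGo_fuel plain _ hn (2 * (plain.length + 1)) (plain.length + 1) 0 le_rfl
        (by rw [hn]; push_cast; omega) (by rw [hn]; push_cast; omega)
    rw [pv_spans_eq_pairUp plain _ hn (plain.length + 1) 0 le_rfl, hmarks]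
    have hgood := (pv_marksGo_good plain _ hn (plain.length + 1) 0 le_rfl).1
    rw [pv_snap_eq_core _ idx hg.1 hg.2 _ hgood]
    rfl
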